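-- pv_equiv track=rewrite | github.com/TorNATO-PRO/therian-feature-extraction | main.py | get_vertex_map
-- ===== SOURCE A (Python) =====
-- from typing import List, Any, Dict
--
-- def get_vertex_map(vertices: List[str]) -> Dict[str, int]:
--     """
--     From a list of vertices, obtain a zero indexed mapping of
--     vertices while maintaining the relationships between vertices.
--
--     :param vertices: The vertices that the function accepts.
--     :return: A dictionary containing a mapping of a string vertex to an integer.
--     """
--     idx = 0
--     vertex_map = {}
--     for v in vertices:
--         vertex = vertex_map.get(v)
--         if vertex is None:
--             vertex_map[v] = idx
--             idx += 1
--
--     return vertex_map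
-- ===== SOURCE B (Python) =====
-- def get_vertex_map(vertices):
--     """Map each distinct vertex to its zero-based first-occurrence rank."""
--     order = sorted(set(vertices), key=vertices.index)
--     return {v: i for i, v in enumerate(order)}
-- ===== Notes on version B (the rewrite author's own statement) =====
-- stated objective: alternative
-- what changed: A builds the map in one pass with a running index counter and a None-check; B instead collapses the input to its distinct vertices with set(), recovers the first-occurrence order by sorting them under key=vertices.index, and enumerates the sorted list - a dedup/sort/enumerate pipeline with no running counter.
import Mathlib
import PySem

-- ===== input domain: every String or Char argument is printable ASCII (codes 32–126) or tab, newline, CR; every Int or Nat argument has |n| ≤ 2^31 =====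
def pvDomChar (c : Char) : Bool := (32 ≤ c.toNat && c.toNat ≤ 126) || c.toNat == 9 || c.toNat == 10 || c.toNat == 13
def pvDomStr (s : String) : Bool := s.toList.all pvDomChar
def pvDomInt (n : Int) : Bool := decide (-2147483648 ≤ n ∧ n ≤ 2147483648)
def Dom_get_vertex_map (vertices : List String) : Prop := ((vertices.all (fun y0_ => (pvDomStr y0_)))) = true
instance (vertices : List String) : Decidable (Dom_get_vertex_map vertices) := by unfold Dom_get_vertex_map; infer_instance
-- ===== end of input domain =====

-- B replaces A's one-pass counter loop by a dedup/sort/enumerate pipeline: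
-- set(), then sort by first-occurrence position (vertices.index), then enumerate.

-- ===== PORT A =====
-- A: idx counter and dict built in one loop; insert only when get(v) is None.
def get_vertex_map (vertices : List String) : List (String × Int) :=
  let st := vertices.foldl
    (fun (st : Int × PySem.Dict String Int) v =>
      match st.2.get? v with
      | none => (st.1 + 1, st.2.insert v st.1)
      | some _ => st)
    (0, PySem.Dict.empty)
  st.2.items

-- ===== PORT B =====
-- B: order = sorted(set(vertices), key=vertices.index); then {v: i for i, v in enumerate(order)}.
-- Every element of set(vertices) is in vertices, so vertices.index never raises; the
-- '.getD 0' default of the key is never taken. The key is injective on the set, so the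
-- sorted order is exact regardless of set iteration order. The comprehension's keys are
-- distinct, so the dict's items are exactly the enumerated pairs.
def get_vertex_map_alt (vertices : List String) : List (String × Int) :=
  let order := PySem.List.sorted (PySem.Set.ofList vertices)
    (fun v => (PySem.List.index? vertices v).getD 0) false
  (PySem.List.enumerate order 0).map (fun p => (p.2, p.1))

-- ===== PRECONDITION & SPEC =====
def Spec_get_vertex_map (vertices : List String) (out : List (String × Int)) : Prop := out = get_vertex_map_alt vertices
instance (vertices : List String) (out : List (String × Int)) : Decidable (Spec_get_vertex_map vertices out) := by unfold Spec_get_vertex_map; infer_instance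

-- ===== CLAIM (what is proved, stated in full; the proofs are below) =====
def Claim_equal_get_vertex_map : Prop := ∀ (vertices : List String), Dom_get_vertex_map vertices → Spec_get_vertex_map vertices (get_vertex_map vertices)

-- ===== LEMMAS AND PROOFS =====

/-- set(xs) lists the distinct elements in strictly increasing order of first occurrence. -/
theorem pv_ofList_pairwise_index (xs : List String) :
    (PySem.Set.ofList xs).Pairwise (fun a b => ∃ i j,
      PySem.List.index? xs a = some i ∧ PySem.List.index? xs b = some j ∧ i < j) := by
  induction xs with
  | nil => simp [PySem.Set.ofList_nil]
  | cons x xs ih =>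
    rw [PySem.Set.ofList_cons]
    constructor
    · intro b hb
      obtain ⟨hbs, hbx⟩ := (PySem.Set.mem_discard _ _ _).mp hb
      have hbxs : b ∈ xs := (PySem.Set.mem_ofList _ _).mp hbs
      have hsome : (PySem.List.index? xs b).isSome :=
        (PySem.List.index?_isSome_iff _ _).mpr hbxs
      obtain ⟨j, hj⟩ := Option.isSome_iff_exists.mp hsome
      refine ⟨0, j + 1, PySem.List.index?_cons_self _ _, ?_, Nat.succ_pos j⟩
      rw [PySem.List.index?_cons_of_ne _ (Ne.symm hbx), hj]
      rfl
    · have hsub : (PySem.Set.discard (PySem.Set.ofList xs) x).Pairwise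
          (fun a b => ∃ i j, PySem.List.index? xs a = some i ∧
            PySem.List.index? xs b = some j ∧ i < j) :=
        List.Pairwise.sublist (by simp [PySem.Set.discard]) ih
      refine List.Pairwise.imp_of_mem ?_ hsub
      intro a b ha hb h
      obtain ⟨i, j, hi, hj, hij⟩ := h
      have hax : a ≠ x := ((PySem.Set.mem_discard _ _ _).mp ha).2
      have hbx : b ≠ x := ((PySem.Set.mem_discard _ _ _).mp hb).2
      refine ⟨i + 1, j + 1, ?_, ?_, by omega⟩
      · rw [PySem.List.index?_cons_of_ne _ (Ne.symm hax), hi]; rfl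
      · rw [PySem.List.index?_cons_of_ne _ (Ne.symm hbx), hj]; rfl

/-- B's sort is the identity on set(vertices): it is already in first-occurrence order. -/
theorem pv_sorted_ofList (vertices : List String) :
    PySem.List.sorted (PySem.Set.ofList vertices)
      (fun v => (PySem.List.index? vertices v).getD 0) false
    = PySem.Set.ofList vertices := by
  refine PySem.List.sorted_eq_of_perm_of_pairwise_lt _ _ _ (List.Perm.refl _) ?_
  refine (pv_ofList_pairwise_index vertices).imp ?_
  rintro a b ⟨i, j, hi, hj, hij⟩
  simp only [PySem.List.index?_eq_idxOf?] at hi hj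
  simp [hi, hj, hij]

/-- The dict A has built after processing a prefix whose distinct vertices
(in first-occurrence order) are `seen`. -/
def pvDictOf (seen : List String) : PySem.Dict String Int :=
  PySem.Dict.mk ((PySem.List.enumerate seen 0).map (fun p => (p.2, p.1)))

theorem pvDictOf_keys (seen : List String) : (pvDictOf seen).keys = seen := by
  simp [pvDictOf, PySem.Dict.keys_mk, Function.comp_def, PySem.List.map_snd_enumerate]

theorem pvDictOf_get?_eq_none {seen : List String} {v : String} (hv : v ∉ seen) :
    (pvDictOf seen).get? v = none := by
  rw [PySem.Dict.get?_eq_none_iff_not_mem_keys, pvDictOf_keys]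
  exact hv

theorem pvDictOf_get?_isSome {seen : List String} {v : String} (hv : v ∈ seen) :
    ((pvDictOf seen).get? v).isSome := by
  rw [← PySem.Dict.contains_eq_isSome_get?]
  rw [PySem.Dict.contains_iff_mem_keys, pvDictOf_keys]
  exact hv

theorem pvDictOf_insert_fresh {seen : List String} {v : String} (hv : v ∉ seen) :
    (pvDictOf seen).insert v (seen.length : Int) = pvDictOf (seen ++ [v]) := by
  have hc : (pvDictOf seen).contains v = false := by
    rw [← Bool.not_eq_true, PySem.Dict.contains_iff_mem_keys, pvDictOf_keys]
    exact hv
  have h := PySem.Dict.items_insert_of_not_contains (d := pvDictOf seen)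
    (k := v) (v := (seen.length : Int)) hc
  cases hd : (pvDictOf seen).insert v (seen.length : Int) with
  | mk l =>
    have : l = (pvDictOf (seen ++ [v])).items := by
      have : l = (pvDictOf seen).items ++ [(v, (seen.length : Int))] := by
        rw [← h, hd]
      rw [this]
      simp [pvDictOf, PySem.List.enumerate_append, PySem.List.enumerate_cons]
    simpa [pvDictOf] using congrArg PySem.Dict.mk this

/-- Loop invariant for A's fold: from the state reached after the distinct
vertices `seen`, folding the rest `xs` reaches the state for `Set.update seen xs`. -/
theorem pv_loop (xs : List String) : ∀ (seen : List String), seen.Nodup →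
    xs.foldl
      (fun (st : Int × PySem.Dict String Int) v =>
        match st.2.get? v with
        | none => (st.1 + 1, st.2.insert v st.1)
        | some _ => st)
      ((seen.length : Int), pvDictOf seen)
    = (((PySem.Set.update seen xs).length : Int), pvDictOf (PySem.Set.update seen xs)) := by
  induction xs with
  | nil => intro seen _; simp [PySem.Set.update_nil]
  | cons x xs ih =>
    intro seen hnd
    rw [List.foldl_cons, PySem.Set.update_cons]
    by_cases hx : x ∈ seen
    · have hs : ((pvDictOf seen).get? x).isSome := pvDictOf_get?_isSome hx
      obtain ⟨w, hw⟩ := Option.isSome_iff_exists.mp hs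
      simp only [hw]
      rw [PySem.Set.add_of_mem hx]
      exact ih seen hnd
    · have hn : (pvDictOf seen).get? x = none := pvDictOf_get?_eq_none hx
      simp only [hn]
      rw [PySem.Set.add_of_not_mem hx, pvDictOf_insert_fresh hx]
      have hlen : ((seen ++ [x]).length : Int) = (seen.length : Int) + 1 := by
        simp
      rw [← hlen]
      exact ih (seen ++ [x]) (by
        rw [List.nodup_append]
        refine ⟨hnd, List.nodup_singleton x, ?_⟩
        intro a ha b hb
        have heq : b = x := List.mem_singleton.mp hb
        subst heq
        intro hax
        exact hx (hax ▸ ha))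

-- ===== VERDICT (by name: the statement is the Claim_ definition above) =====
theorem get_vertex_map_spec : Claim_equal_get_vertex_map := by
  intro vertices _
  show get_vertex_map vertices = get_vertex_map_alt vertices
  unfold get_vertex_map get_vertex_map_alt
  rw [pv_sorted_ofList]
  have h0 : ((0 : Int), (PySem.Dict.empty : PySem.Dict String Int))
      = ((([] : List String).length : Int), pvDictOf []) := by
    simp [pvDictOf, PySem.List.enumerate_nil]; rfl
  rw [h0, pv_loop vertices [] List.nodup_nil]
  simp [pvDictOf, PySem.Set.update_nil_left]
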